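-- pv_equiv track=rewrite | github.com/Ivars-Knets/programming-with-python-1 | practice/games/wine_or_cheese.py | print_list_with_extra_word
-- ===== SOURCE A (Python) =====
-- def print_list_with_extra_word(list, word):
--     response = ""
--     for i in range(len(list)):
--         if i == len(list)-1:
--             response += f' {word} {list[i]}'
--         elif i == 0:
--             response += list[i]
--         else:
--             response += f', {list[i]}'
--     return response
-- ===== SOURCE B (Python) =====
-- def print_list_with_extra_word(list, word):
--     if not list:
--         return ""
--     return ", ".join(list[:-1]) + f" {word} {list[-1]}"
-- ===== Notes on version B (the rewrite author's own statement) =====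
-- stated objective: simpler
-- what changed: Replaces the index loop with its three-way positional branch by an empty-list guard plus one ', '.join over list[:-1] concatenated with the final ' word last' piece.
import Mathlib
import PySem

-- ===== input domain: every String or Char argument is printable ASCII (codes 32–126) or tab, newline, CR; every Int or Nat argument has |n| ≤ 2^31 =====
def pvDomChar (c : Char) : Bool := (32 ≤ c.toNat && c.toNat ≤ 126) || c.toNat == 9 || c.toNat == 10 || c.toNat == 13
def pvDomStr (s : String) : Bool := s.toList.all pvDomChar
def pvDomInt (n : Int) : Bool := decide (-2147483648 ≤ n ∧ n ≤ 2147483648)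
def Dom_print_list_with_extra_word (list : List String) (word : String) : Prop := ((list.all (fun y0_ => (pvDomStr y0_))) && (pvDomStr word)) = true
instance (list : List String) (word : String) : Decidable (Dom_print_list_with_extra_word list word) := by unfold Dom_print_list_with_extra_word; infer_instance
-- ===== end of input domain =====

-- B replaces A's index loop with an empty-list guard plus one join over list[:-1] and the final " word last" piece (objective: simpler).

-- ===== PORT A =====
-- index loop over range(len(list)); last-index branch first, then i == 0, else ', x'
def print_list_with_extra_word (list : List String) (word : String) : String :=
  String.ofList <|
    (PySem.List.pyRange 0 (list.length : Int) 1).foldl (fun response i =>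
      if i = (list.length : Int) - 1 then
        response ++ ' ' :: word.toList ++ ' ' :: (PySem.List.pyGetD list i "").toList
      else if i = 0 then
        response ++ (PySem.List.pyGetD list i "").toList
      else
        response ++ ',' :: ' ' :: (PySem.List.pyGetD list i "").toList) []

-- ===== PORT B =====
-- guard the empty list; otherwise ", ".join(list[:-1]) + f" {word} {list[-1]}"
def print_list_with_extra_word_alt (list : List String) (word : String) : String :=
  if list = [] then ""
  else
    String.ofList <|
      PySem.Chars.join [',', ' '] ((PySem.List.slice list none (some (-1))).map String.toList)
        ++ ' ' :: word.toList ++ ' ' :: (PySem.List.pyGetD list (-1) "").toList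

-- ===== PRECONDITION & SPEC =====
def Spec_print_list_with_extra_word (list : List String) (word : String) (out : String) : Prop := out = print_list_with_extra_word_alt list word
instance (list : List String) (word : String) (out : String) : Decidable (Spec_print_list_with_extra_word list word out) := by unfold Spec_print_list_with_extra_word; infer_instance

-- ===== CLAIM (what is proved, stated in full; the proofs are below) =====
def Claim_equal_print_list_with_extra_word : Prop := ∀ (list : List String) (word : String), Dom_print_list_with_extra_word list word → Spec_print_list_with_extra_word list word (print_list_with_extra_word list word)

-- ===== LEMMAS AND PROOFS =====

-- join over a snoc: empty prefix gives the piece alone, otherwise sep in between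
theorem join_snoc (sep : List Char) (ps : List (List Char)) (p : List Char) :
    PySem.Chars.join sep (ps ++ [p]) =
      (match ps with | [] => p | _ :: _ => PySem.Chars.join sep ps ++ sep ++ p) := by
  induction ps with
  | nil => simp [PySem.Chars.join_singleton]
  | cons q qs ih =>
    cases qs with
    | nil => simp [PySem.Chars.join_cons_cons, PySem.Chars.join_singleton]
    | cons r rs =>
      simp only [List.cons_append, PySem.Chars.join_cons_cons] at *
      simp [ih, List.append_assoc]

-- an element of the prefix of a snoc is read from the prefix
theorem pyGetD_snoc_lt (us : List String) (u : String) (i : Int)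
    (h0 : 0 ≤ i) (hlt : i < (us.length : Int)) :
    PySem.List.pyGetD (us ++ [u]) i "" = PySem.List.pyGetD us i "" := by
  obtain ⟨n, rfl⟩ := Int.eq_ofNat_of_zero_le h0
  have hn : n < us.length := by exact_mod_cast hlt
  simp [PySem.List.pyGetD_natCast, List.getElem?_append_left, hn, List.getD]

-- the prefix loop (no last-index branch) builds exactly ", ".join(ys)
theorem prefix_fold_eq_join (ys : List String) :
    (PySem.List.pyRange 0 (ys.length : Int) 1).foldl (fun r i =>
        if i = 0 then r ++ (PySem.List.pyGetD ys i "").toList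
        else r ++ ',' :: ' ' :: (PySem.List.pyGetD ys i "").toList) [] =
      PySem.Chars.join [',', ' '] (ys.map String.toList) := by
  induction ys using List.reverseRecOn with
  | nil => simp [PySem.List.pyRange]
  | append_singleton us u ih =>
    have hrange : PySem.List.pyRange 0 ((us.length : Int) + 1) 1
        = PySem.List.pyRange 0 (us.length : Int) 1 ++ [(us.length : Int)] :=
      PySem.List.pyRange_one_succ_right (by omega)
    have hcongr :
        (PySem.List.pyRange 0 (us.length : Int) 1).foldl (fun r i =>
            if i = 0 then r ++ (PySem.List.pyGetD (us ++ [u]) i "").toList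
            else r ++ ',' :: ' ' :: (PySem.List.pyGetD (us ++ [u]) i "").toList) []
        = (PySem.List.pyRange 0 (us.length : Int) 1).foldl (fun r i =>
            if i = 0 then r ++ (PySem.List.pyGetD us i "").toList
            else r ++ ',' :: ' ' :: (PySem.List.pyGetD us i "").toList) [] := by
      apply PySem.List.foldl_congr_mem
      intro r i hi
      have hmem := (PySem.List.mem_pyRange_one).1 hi
      rw [pyGetD_snoc_lt us u i hmem.1 hmem.2]
    have hlast : PySem.List.pyGetD (us ++ [u]) (us.length : Int) "" = u := by
      simp [PySem.List.pyGetD_natCast]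
    cases us with
    | nil =>
      have h1 : PySem.List.pyRange 0 1 1 = [0] := by decide
      simp [h1, PySem.Chars.join_singleton, PySem.List.pyGetD_zero_cons]
    | cons v vs =>
      rw [show ((((v :: vs) ++ [u]).length : Int)) = ((v :: vs).length : Int) + 1 by simp]
      rw [hrange, List.foldl_append, hcongr, ih, List.foldl_cons]
      have hne : ((v :: vs).length : Int) ≠ 0 := by simp only [List.length_cons]; push_cast; omega
      rw [if_neg hne, hlast, List.foldl_nil]
      rw [show List.map String.toList ((v :: vs) ++ [u])
            = List.map String.toList (v :: vs) ++ [u.toList] by simp]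
      rw [join_snoc]
      simp [List.append_assoc]

-- ===== VERDICT (by name: the statement is the Claim_ definition above) =====
theorem print_list_with_extra_word_spec : Claim_equal_print_list_with_extra_word := by
  intro list word _
  unfold Spec_print_list_with_extra_word print_list_with_extra_word print_list_with_extra_word_alt
  induction list using List.reverseRecOn with
  | nil => simp [PySem.List.pyRange]
  | append_singleton ys z _ =>
    rw [if_neg (by simp)]
    have hz : PySem.List.pyGetD (ys ++ [z]) (-1) "" = z :=
      PySem.List.pyGetD_neg_one_append_singleton ys z ""
    have hslice : PySem.List.slice (ys ++ [z]) none (some (-1)) = ys := by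
      rw [show ((-1 : Int)) = -((1 : Nat) : Int) by norm_num]
      rw [PySem.List.slice_to_neg_natCast (k := 1)]
      · simp
      · norm_num
    have hlen : ((ys ++ [z]).length : Int) - 1 = (ys.length : Int) := by simp
    have hrange : PySem.List.pyRange 0 (((ys ++ [z]).length : Int)) 1
        = PySem.List.pyRange 0 (ys.length : Int) 1 ++ [(ys.length : Int)] := by
      rw [show (((ys ++ [z]).length : Int)) = (ys.length : Int) + 1 by simp]
      exact PySem.List.pyRange_one_succ_right (by omega)
    have hcongr :
        (PySem.List.pyRange 0 (ys.length : Int) 1).foldl (fun response i =>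
            if i = ((ys ++ [z]).length : Int) - 1 then
              response ++ ' ' :: word.toList ++ ' ' :: (PySem.List.pyGetD (ys ++ [z]) i "").toList
            else if i = 0 then response ++ (PySem.List.pyGetD (ys ++ [z]) i "").toList
            else response ++ ',' :: ' ' :: (PySem.List.pyGetD (ys ++ [z]) i "").toList) []
        = (PySem.List.pyRange 0 (ys.length : Int) 1).foldl (fun r i =>
            if i = 0 then r ++ (PySem.List.pyGetD ys i "").toList
            else r ++ ',' :: ' ' :: (PySem.List.pyGetD ys i "").toList) [] := by
      apply PySem.List.foldl_congr_mem
      intro r i hi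
      have hmem := (PySem.List.mem_pyRange_one).1 hi
      have hne : i ≠ ((ys ++ [z]).length : Int) - 1 := by rw [hlen]; omega
      rw [if_neg hne, pyGetD_snoc_lt ys z i hmem.1 hmem.2]
    have hlastget : PySem.List.pyGetD (ys ++ [z]) (ys.length : Int) "" = z := by
      simp [PySem.List.pyGetD_natCast]
    rw [hrange, List.foldl_append, hcongr, prefix_fold_eq_join, List.foldl_cons]
    rw [if_pos hlen.symm, hlastget, List.foldl_nil, hslice, hz]
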